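-- pv_equiv track=rewrite | github.com/D-Mutabazi/Machine-Learning-and-Python-Projects | Fx Forcasting models/FNeuralNetwork/V2_FNeuralNetwork.py | featuresComblist
-- ===== SOURCE A (Python) =====
-- def featuresComblist(features):
--     import itertools
--
--     initial_feature = ['Close'] # Starting with the closing price
--
--     # Get all combinations of the features list and add to the initial feature (Closing Price)
--     feature_combinations = []
--     for i in range(len(features) + 1):
--         for combination in itertools.combinations(features, i):
--             feature_combinations.append(list(combination)+ initial_feature )
--
--     return feature_combinations
-- ===== SOURCE B (Python) =====
-- def featuresComblist(features):
--     # DP table: buckets[k] = all size-k combinations (lexicographic), built by one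
--     # right-to-left pass over the features; then append 'Close' to each.
--     buckets = [[[]]]
--     for x in reversed(features):
--         nb = [[[]]]
--         for k in range(1, len(buckets) + 1):
--             row = [[x] + c for c in buckets[k - 1]]
--             if k < len(buckets):
--                 row = row + buckets[k]
--             nb.append(row)
--         buckets = nb
--     return [c + ['Close'] for bucket in buckets for c in bucket]
-- ===== Notes on version B (the rewrite author's own statement) =====
-- stated objective: alternative
-- what changed: Replaces the per-size itertools.combinations calls with a single right-to-left dynamic-programming pass that maintains a table of all combination sizes at once, then flattens it.
import Mathlib
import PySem

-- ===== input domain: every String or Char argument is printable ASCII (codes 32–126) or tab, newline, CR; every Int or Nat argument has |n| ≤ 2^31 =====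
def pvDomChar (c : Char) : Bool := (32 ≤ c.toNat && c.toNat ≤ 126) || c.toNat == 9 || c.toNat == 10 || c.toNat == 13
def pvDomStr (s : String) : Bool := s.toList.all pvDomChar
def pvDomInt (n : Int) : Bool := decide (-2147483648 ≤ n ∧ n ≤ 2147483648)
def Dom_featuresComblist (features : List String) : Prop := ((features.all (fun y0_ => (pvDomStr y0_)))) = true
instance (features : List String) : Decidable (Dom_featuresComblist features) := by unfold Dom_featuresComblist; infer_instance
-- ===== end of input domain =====

-- B replaces the per-size itertools.combinations calls with one right-to-left DP pass
-- building a table of all combination sizes at once (alternative decomposition, same cost).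


-- ===== PORT A =====
-- itertools.combinations(features, k) in its documented lexicographic order
def pyCombinations : List String → Nat → List (List String)
  | _, 0 => [[]]
  | [], _ + 1 => []
  | x :: rest, k + 1 =>
      (pyCombinations rest k).map (fun c => x :: c) ++ pyCombinations rest (k + 1)

def featuresComblist (features : List String) : List (List String) :=
  (List.range (features.length + 1)).foldl
    (fun acc i => acc ++ (pyCombinations features i).map (fun c => c ++ ["Close"])) []

-- ===== PORT B =====
-- inner loop of Source B: row k = [x]+c for c in buckets[k-1], plus buckets[k] if it exists
def altRows (x : String) : List (List (List String)) → List (List (List String))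
  | [] => []
  | [b] => [b.map (fun c => x :: c)]
  | b :: b' :: rest => (b.map (fun c => x :: c) ++ b') :: altRows x (b' :: rest)

def altStep (buckets : List (List (List String))) (x : String) : List (List (List String)) :=
  [[]] :: altRows x buckets

def featuresComblist_alt (features : List String) : List (List String) :=
  (features.reverse.foldl altStep [[[]]]).flatMap (fun bucket => bucket.map (fun c => c ++ ["Close"]))

-- ===== PRECONDITION & SPEC =====
def Spec_featuresComblist (features : List String) (out : List (List String)) : Prop := out = featuresComblist_alt features
instance (features : List String) (out : List (List String)) : Decidable (Spec_featuresComblist features out) := by unfold Spec_featuresComblist; infer_instance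

-- ===== CLAIM (what is proved, stated in full; the proofs are below) =====
def Claim_equal_featuresComblist : Prop := ∀ (features : List String), Dom_featuresComblist features → Spec_featuresComblist features (featuresComblist features)

-- ===== LEMMAS AND PROOFS =====

theorem pyCombinations_eq_nil {xs : List String} {k : Nat} (h : xs.length < k) :
    pyCombinations xs k = [] := by
  induction xs generalizing k with
  | nil =>
    cases k with
    | zero => omega
    | succ k => rfl
  | cons x rest ih =>
    cases k with
    | zero => omega
    | succ k =>
      simp only [pyCombinations]
      have h1 : rest.length < k := by simpa using Nat.lt_of_succ_lt_succ h
      rw [ih h1, ih (Nat.lt_succ_of_lt h1)]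
      rfl

theorem altRows_range' (rest : List String) (x : String) :
    ∀ (n k : Nat), k + n = rest.length →
      altRows x ((List.range' k (n + 1)).map (pyCombinations rest)) =
        (List.range' k (n + 1)).map
          (fun j => (pyCombinations rest j).map (fun c => x :: c) ++ pyCombinations rest (j + 1)) := by
  intro n
  induction n with
  | zero =>
    intro k hk
    simp only [List.range'_succ, List.range'_zero, List.map_cons, List.map_nil, altRows]
    rw [pyCombinations_eq_nil (show rest.length < k + 1 by omega)]
    simp
  | succ n ih =>
    intro k hk
    have e1 : List.range' k (n + 1 + 1) = k :: (k + 1) :: List.range' (k + 2) n := by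
      rw [List.range'_succ, List.range'_succ]
    have e2 : List.range' (k + 1) (n + 1) = (k + 1) :: List.range' (k + 2) n := by
      rw [List.range'_succ]
    rw [e1]
    simp only [List.map_cons, altRows]
    congr 1
    have := ih (k + 1) (by omega)
    rw [e2] at this
    simpa using this

theorem altFold_eq (xs : List String) :
    xs.foldr (fun x buckets => altStep buckets x) [[[]]] =
      (List.range (xs.length + 1)).map (pyCombinations xs) := by
  induction xs with
  | nil => rfl
  | cons x rest ih =>
    rw [List.foldr_cons, ih]
    unfold altStep
    rw [List.range_eq_range', altRows_range' rest x rest.length 0 (by omega)]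
    have e3 : List.range ((x :: rest).length + 1) = 0 :: List.range' 1 (rest.length + 1) := by
      rw [List.range_eq_range', List.length_cons, List.range'_succ]
    rw [e3]
    simp only [List.map_cons]
    congr 1
    conv_rhs => rw [List.range'_eq_map_range]
    rw [← List.range_eq_range', List.map_map]
    apply List.map_congr_left
    intro j hj
    show _ = pyCombinations (x :: rest) (1 + j)
    rw [Nat.add_comm 1 j]
    rfl

-- ===== VERDICT (by name: the statement is the Claim_ definition above) =====
theorem featuresComblist_spec : Claim_equal_featuresComblist := by
  intro features _
  unfold Spec_featuresComblist featuresComblist featuresComblist_alt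
  rw [List.foldl_reverse, altFold_eq, PySem.List.foldl_append_eq_flatMap,
    List.flatMap_map]
  rfl
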